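-- pv_equiv track=rewrite | github.com/nahnero/inexrecur | inexrecur_trace.py | CalculateD
-- ===== SOURCE A (Python) =====
-- def CalculateD (W):
--     D = [0]*len (W)
--     z, j = 0, 0
--     for i in range (len (W)):
--         if W[j:i] not in X:
--             z += 1
--             j = i + 1
--         D[i] = z
--     return D
--
-- X = 'googol$';
-- ===== SOURCE B (Python) =====
-- X = 'googol$'
--
-- def _longest(W, j):
--     # longest l such that W[j:j+l] is a substring of X (descending probe; l=0 always matches)
--     for l in range(min(len(X), len(W) - j), -1, -1):
--         if W[j:j+l] in X:
--             return l
--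
-- def CalculateD(W):
--     # Stage 1: jump directly between "break" positions using longest-match lengths,
--     # instead of testing every index.
--     n = len(W)
--     breaks = []
--     j = 0
--     while True:
--         p = j + _longest(W, j) + 1
--         if p >= n:
--             break
--         breaks.append(p)
--         j = p + 1
--     # Stage 2: materialize D by constant segments between breaks.
--     D = []
--     z = 0
--     prev = 0
--     for p in breaks:
--         D.extend([z] * (p - prev))
--         z += 1
--         D.append(z)
--         prev = p + 1
--     D.extend([z] * (n - prev))
--     return D
-- ===== Notes on version B (the rewrite author's own statement) =====
-- stated objective: alternative
-- what changed: A scans every index testing W[j:i] in X; B instead jumps directly from break to break (computing at each jump the longest prefix of the remaining text that is a substring of X by a descending probe) and then materializes D as constant segments between the recorded break positions.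
import Mathlib
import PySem

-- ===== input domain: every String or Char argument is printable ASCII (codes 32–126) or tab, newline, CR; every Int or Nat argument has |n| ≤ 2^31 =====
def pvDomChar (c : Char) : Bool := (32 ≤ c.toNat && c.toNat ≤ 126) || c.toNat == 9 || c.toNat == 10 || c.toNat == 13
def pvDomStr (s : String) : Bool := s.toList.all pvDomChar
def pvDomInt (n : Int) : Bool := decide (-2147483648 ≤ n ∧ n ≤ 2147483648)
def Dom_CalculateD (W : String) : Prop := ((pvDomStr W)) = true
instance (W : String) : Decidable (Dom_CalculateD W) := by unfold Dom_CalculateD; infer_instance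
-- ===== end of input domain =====

-- B replaces A's per-index scan (testing W[j:i] in X at every i) by jumping directly
-- from break to break via longest-match lengths and materializing D by constant
-- segments between the recorded breaks (objective: alternative).

-- ===== PORT A =====
-- module constant X = 'googol$'
def pvXchars : List Char := "googol$".toList

-- loop body of A: state (D, z, j), index i
def pvStepA (Ws : List Char) (st : List Int × Int × Int) (i : Int) : List Int × Int × Int :=
  let zj := if PySem.Chars.isIn (PySem.List.slice Ws (some st.2.2) (some i)) pvXchars = false
            then (st.2.1 + 1, i + 1) else (st.2.1, st.2.2)
  ((st.1.set i.toNat zj.1), zj.1, zj.2)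

def CalculateD (W : String) : List Int :=
  let Ws := W.toList
  let res := (PySem.List.pyRange 0 (Ws.length : Int) 1).foldl (pvStepA Ws)
    (List.replicate Ws.length 0, 0, 0)
  res.1

-- ===== PORT B =====
-- _longest's descending loop 'for l in range(min(len(X), len(W)-j), -1, -1)': the l = 0
-- probe tests '' in X, which is always true, so the 0 case returns 0 directly.
-- W[j:j+l] is ported as (Ws.drop j).take l — exact for natural bounds (PySem.List.slice_natCast_add).
def pvLongestAux (Ws : List Char) (j : Nat) : Nat → Nat
  | 0 => 0
  | (l+1) => if PySem.Chars.isIn ((Ws.drop j).take (l+1)) pvXchars then l+1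
             else pvLongestAux Ws j l

def pvLongest (Ws : List Char) (j : Nat) : Nat :=
  pvLongestAux Ws j (min pvXchars.length (Ws.length - j))

-- the while-loop collecting break positions: p = j + _longest(W, j) + 1; stop when p ≥ n
def pvBreaks (Ws : List Char) (j : Nat) : List Nat :=
  if h : j + pvLongest Ws j + 1 < Ws.length then
    (j + pvLongest Ws j + 1) :: pvBreaks Ws (j + pvLongest Ws j + 2)
  else []
termination_by Ws.length - j
decreasing_by omega

-- body of the 'for p in breaks' loop: state (D, z, prev)
def pvSegStep (st : List Int × Int × Nat) (p : Nat) : List Int × Int × Nat :=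
  (st.1 ++ List.replicate (p - st.2.2) st.2.1 ++ [st.2.1 + 1], st.2.1 + 1, p + 1)

def CalculateD_alt (W : String) : List Int :=
  let Ws := W.toList
  let r := (pvBreaks Ws 0).foldl pvSegStep ([], 0, 0)
  r.1 ++ List.replicate (Ws.length - r.2.2) r.2.1

-- ===== PRECONDITION & SPEC =====
def Spec_CalculateD (W : String) (out : List Int) : Prop := out = CalculateD_alt W
instance (W : String) (out : List Int) : Decidable (Spec_CalculateD W out) := by unfold Spec_CalculateD; infer_instance

-- ===== CLAIM (what is proved, stated in full; the proofs are below) =====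
def Claim_equal_CalculateD : Prop := ∀ (W : String), Dom_CalculateD W → Spec_CalculateD W (CalculateD W)

-- ===== LEMMAS AND PROOFS =====

-- the common shape of the tail D[j:] produced by both programs, following pvBreaks' recursion
def pvSuffix (Ws : List Char) (j : Nat) (z : Int) : List Int :=
  if j + pvLongest Ws j + 1 < Ws.length then
    List.replicate (pvLongest Ws j + 1) z ++ [z + 1]
      ++ pvSuffix Ws (j + pvLongest Ws j + 2) (z + 1)
  else List.replicate (Ws.length - j) z
termination_by Ws.length - j
decreasing_by omega

theorem pv_aux_le (Ws : List Char) (j m : Nat) : pvLongestAux Ws j m ≤ m := by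
  induction m with
  | zero => simp [pvLongestAux]
  | succ l ih =>
    simp only [pvLongestAux]
    split
    · exact le_refl _
    · exact Nat.le_succ_of_le ih

theorem pv_aux_in (Ws : List Char) (j m : Nat) :
    PySem.Chars.isIn ((Ws.drop j).take (pvLongestAux Ws j m)) pvXchars = true := by
  induction m with
  | zero =>
    simp only [pvLongestAux, List.take_zero]
    exact (PySem.Chars.isIn_iff_infix _ _).mpr List.nil_infix
  | succ l ih =>
    simp only [pvLongestAux]
    split
    · assumption
    · exact ih

theorem pv_aux_max (Ws : List Char) (j m : Nat) :
    ∀ k, pvLongestAux Ws j m < k → k ≤ m →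
      PySem.Chars.isIn ((Ws.drop j).take k) pvXchars = false := by
  induction m with
  | zero => intro k h1 h2; omega
  | succ l ih =>
    intro k h1 h2
    simp only [pvLongestAux] at h1
    by_cases ht : PySem.Chars.isIn ((Ws.drop j).take (l+1)) pvXchars = true
    · rw [if_pos ht] at h1; omega
    · rw [if_neg ht] at h1
      rcases Nat.lt_or_ge k (l+1) with hk | hk
      · exact ih k h1 (by omega)
      · have : k = l + 1 := by omega
        subst this
        exact Bool.eq_false_iff.mpr ht

-- prefix closure of 'sub in X'
theorem pv_isIn_take_mono (s : List Char) (k l : Nat) (hk : k ≤ l)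
    (h : PySem.Chars.isIn (s.take l) pvXchars = true) :
    PySem.Chars.isIn (s.take k) pvXchars = true := by
  apply (PySem.Chars.isIn_iff_infix _ _).mpr
  have h1 : s.take k <:+: s.take l := by
    have : (s.take l).take k = s.take k := by
      rw [List.take_take]; congr 1; omega
    exact this ▸ ((s.take l).take_prefix k).isInfix
  exact h1.trans ((PySem.Chars.isIn_iff_infix _ _).mp h)

theorem pv_longest_in (Ws : List Char) (j k : Nat) (hk : k ≤ pvLongest Ws j) :
    PySem.Chars.isIn ((Ws.drop j).take k) pvXchars = true :=
  pv_isIn_take_mono _ k _ hk (pv_aux_in Ws j _)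

theorem pv_longest_max (Ws : List Char) (j : Nat)
    (h : pvLongest Ws j + 1 ≤ Ws.length - j) :
    PySem.Chars.isIn ((Ws.drop j).take (pvLongest Ws j + 1)) pvXchars = false := by
  set m := min pvXchars.length (Ws.length - j) with hm
  have hdef : pvLongest Ws j = pvLongestAux Ws j m := by rw [pvLongest, hm]
  have hle : pvLongestAux Ws j m ≤ m := pv_aux_le Ws j m
  have hX : pvXchars.length = 7 := rfl
  rcases Nat.lt_or_ge (pvLongest Ws j) m with hlt | hge
  · exact pv_aux_max Ws j m _ (by omega) (by omega)
  · have heq : pvLongest Ws j = m := by omega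
    have hmx : m = pvXchars.length ∨ m = Ws.length - j := by
      rcases Nat.le_total pvXchars.length (Ws.length - j) with hc | hc
      · exact Or.inl (hm.trans (min_eq_left hc))
      · exact Or.inr (hm.trans (min_eq_right hc))
    apply Bool.eq_false_iff.mpr
    intro hc
    have hlen := ((PySem.Chars.isIn_iff_infix _ _).mp hc).length_le
    rw [List.length_take, List.length_drop] at hlen
    rcases hmx with h1 | h1 <;> omega

-- ----- A side -----

-- a run of indices i, i+1, …, i+k-1 on which every window W[j:m] is in X:
-- D gets z written at each position, z and j are unchanged
theorem pv_runA (Ws : List Char) (z : Int) (j : Nat) :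
    ∀ (k i : Nat) (D : List Int), D.length = Ws.length → j ≤ i → i + k ≤ Ws.length →
    (∀ m : Nat, i ≤ m → m < i + k →
        PySem.Chars.isIn ((Ws.drop j).take (m - j)) pvXchars = true) →
    (PySem.List.pyRange (i : Int) ((i : Int) + (k : Int)) 1).foldl (pvStepA Ws) (D, z, (j : Int))
      = (D.take i ++ List.replicate k z ++ D.drop (i + k), z, (j : Int)) := by
  intro k
  induction k with
  | zero =>
    intro i D hD hji hk hwin
    rw [show (i : Int) + ((0 : Nat) : Int) = (i : Int) by push_cast; ring,
        PySem.List.pyRange_one_eq_nil (le_refl _)]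
    simp
  | succ k ih =>
    intro i D hD hji hk hwin
    have hcons : PySem.List.pyRange (i : Int) ((i : Int) + ((k+1 : Nat) : Int)) 1
        = (i : Int) :: PySem.List.pyRange ((i : Int) + 1) ((i : Int) + ((k+1 : Nat) : Int)) 1 := by
      apply PySem.List.pyRange_one_cons; push_cast; omega
    rw [hcons, List.foldl_cons]
    have hstep : pvStepA Ws (D, z, (j : Int)) (i : Int) = (D.set i z, z, (j : Int)) := by
      simp only [pvStepA, PySem.List.slice_natCast, hwin i (le_refl _) (by omega),
        Bool.true_eq_false, reduceIte, Int.toNat_natCast]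
    rw [hstep]
    have hrange : PySem.List.pyRange ((i : Int) + 1) ((i : Int) + ((k+1 : Nat) : Int)) 1
        = PySem.List.pyRange ((i+1 : Nat) : Int) (((i+1 : Nat) : Int) + ((k : Nat) : Int)) 1 := by
      congr 1 <;> push_cast <;> ring
    rw [hrange, ih (i+1) (D.set i z) (by simp [hD]) (by omega) (by omega)
      (fun m h1 h2 => hwin m (by omega) (by omega))]
    have hlt : i < D.length := by omega
    have hset : D.set i z = D.take i ++ z :: D.drop (i + 1) := by
      rw [List.set_eq_take_append_cons_drop, if_pos hlt]
    have hlenA : (List.take i D).length = i := by rw [List.length_take]; omega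
    have hA : (D.set i z).take (i+1) = D.take i ++ [z] := by
      rw [hset, List.take_append, hlenA, List.take_take,
          Nat.min_eq_right (by omega), show i + 1 - i = 1 by omega]
      simp
    have hB : (D.set i z).drop (i+1+k) = D.drop (i+1+k) := by
      rw [hset, List.drop_append, List.drop_eq_nil_of_le (by rw [hlenA]; omega), hlenA,
          show i + 1 + k - i = k + 1 by omega, List.drop_succ_cons, List.drop_drop]
      rw [show i + 1 + k = k + (i + 1) by omega]
      simp
    rw [hA, hB, show i + (k+1) = i + 1 + k by omega, List.replicate_succ]
    simp [List.append_assoc]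

-- the main A-side lemma: the remaining loop from state (D, z, j) at index j writes pvSuffix
theorem pv_mainA (Ws : List Char) :
    ∀ (fuel j : Nat) (z : Int) (D : List Int), Ws.length - j ≤ fuel →
      D.length = Ws.length → j ≤ Ws.length →
    ((PySem.List.pyRange (j : Int) (Ws.length : Int) 1).foldl (pvStepA Ws) (D, z, (j : Int))).1
      = D.take j ++ pvSuffix Ws j z := by
  intro fuel
  induction fuel with
  | zero =>
    intro j z D hf hD hj
    have hjn : j = Ws.length := by omega
    subst hjn
    rw [PySem.List.pyRange_one_eq_nil (le_refl _), pvSuffix, if_neg (by omega)]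
    simp [← hD]
  | succ fuel ih =>
    intro j z D hf hD hj
    by_cases hp : j + pvLongest Ws j + 1 < Ws.length
    · set l := pvLongest Ws j with hl
      set p := j + l + 1 with hpdef
      have hsplit : PySem.List.pyRange (j : Int) (Ws.length : Int) 1
          = PySem.List.pyRange (j : Int) ((p : Nat) : Int) 1
            ++ PySem.List.pyRange ((p : Nat) : Int) (Ws.length : Int) 1 := by
        apply PySem.List.pyRange_one_append <;> (push_cast; omega)
      rw [hsplit, List.foldl_append]
      have hrun := pv_runA Ws z j (l+1) j D hD (le_refl _) (by omega)
        (fun m h1 h2 => pv_longest_in Ws j (m - j) (by rw [← hl]; omega))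
      rw [show ((p : Nat) : Int) = (j : Int) + ((l+1 : Nat) : Int) by push_cast; omega, hrun]
      have hcons : PySem.List.pyRange ((j : Int) + ((l+1 : Nat) : Int)) (Ws.length : Int) 1
          = ((p : Nat) : Int) :: PySem.List.pyRange (((p+1 : Nat) : Int)) (Ws.length : Int) 1 := by
        rw [show ((j : Int) + ((l+1 : Nat) : Int)) = ((p : Nat) : Int) by push_cast; omega]
        apply PySem.List.pyRange_one_cons; push_cast; omega
      rw [hcons, List.foldl_cons]
      have hABlen : (List.take j D ++ List.replicate (l+1) z).length = p := by
        simp [List.length_take]; omega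
      have hdropP : D.drop (j + (l+1)) = D[p]'(by omega) :: D.drop (p+1) := by
        rw [show j + (l+1) = p by omega]
        exact List.drop_eq_getElem_cons (by omega)
      have hmax : PySem.Chars.isIn ((Ws.drop j).take (l+1)) pvXchars = false := by
        rw [hl]; exact pv_longest_max Ws j (by omega)
      have hstep : pvStepA Ws
            (List.take j D ++ List.replicate (l+1) z ++ D.drop (j + (l+1)), z, (j : Int))
            ((p : Nat) : Int)
          = (List.take j D ++ List.replicate (l+1) z ++ (z+1) :: D.drop (p+1), z + 1,
             ((p+1 : Nat) : Int)) := by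
        simp only [pvStepA, PySem.List.slice_natCast]
        rw [show p - j = l + 1 by omega, hmax]
        simp only [reduceIte, Int.toNat_natCast]
        rw [List.set_append, if_neg (by rw [hABlen]; omega), hABlen, Nat.sub_self, hdropP,
            List.set_cons_zero]
        refine Prod.ext rfl (Prod.ext rfl ?_)
        push_cast; ring
      rw [hstep]
      have hIH := ih (p+1) (z+1)
        (List.take j D ++ List.replicate (l+1) z ++ (z+1) :: D.drop (p+1))
        (by omega) (by simp [List.length_take]; omega) (by omega)
      rw [hIH]
      have htake : (List.take j D ++ List.replicate (l+1) z ++ (z+1) :: D.drop (p+1)).take (p+1)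
          = List.take j D ++ List.replicate (l+1) z ++ [z+1] := by
        rw [List.take_append, hABlen, List.take_of_length_le (by omega),
            show p + 1 - p = 1 by omega]
        simp
      rw [htake]
      conv_rhs => rw [pvSuffix]
      rw [if_pos (show j + pvLongest Ws j + 1 < Ws.length from hp)]
      rw [show j + pvLongest Ws j + 2 = p + 1 by omega]
      simp [List.append_assoc, ← hl]
    · rw [show (Ws.length : Int) = (j : Int) + ((Ws.length - j : Nat) : Int) by push_cast; omega]
      rw [pv_runA Ws z j (Ws.length - j) j D hD (le_refl _) (by omega)
        (fun m h1 h2 => pv_longest_in Ws j (m - j) (by omega))]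
      rw [pvSuffix, if_neg hp]
      simp [hD]
      omega

-- ----- B side -----

theorem pv_mainB (Ws : List Char) :
    ∀ (fuel j : Nat) (z : Int) (Dacc : List Int), Ws.length - j ≤ fuel → j ≤ Ws.length →
    ((pvBreaks Ws j).foldl pvSegStep (Dacc, z, j)).1
      ++ List.replicate (Ws.length - ((pvBreaks Ws j).foldl pvSegStep (Dacc, z, j)).2.2)
           ((pvBreaks Ws j).foldl pvSegStep (Dacc, z, j)).2.1
      = Dacc ++ pvSuffix Ws j z := by
  intro fuel
  induction fuel with
  | zero =>
    intro j z Dacc hf hj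
    have hjn : j = Ws.length := by omega
    rw [pvBreaks, dif_neg (by omega)]
    rw [pvSuffix, if_neg (by omega)]
    simp
  | succ fuel ih =>
    intro j z Dacc hf hj
    by_cases hp : j + pvLongest Ws j + 1 < Ws.length
    · rw [pvBreaks, dif_pos hp, List.foldl_cons]
      have hstep : pvSegStep (Dacc, z, j) (j + pvLongest Ws j + 1)
          = (Dacc ++ List.replicate (pvLongest Ws j + 1) z ++ [z+1], z+1,
             j + pvLongest Ws j + 2) := by
        simp only [pvSegStep]
        rw [show j + pvLongest Ws j + 1 - j = pvLongest Ws j + 1 by omega]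
      rw [hstep, ih (j + pvLongest Ws j + 2) (z+1) _ (by omega) (by omega)]
      conv_rhs => rw [pvSuffix]
      rw [if_pos hp]
      simp [List.append_assoc]
    · rw [pvBreaks, dif_neg hp]
      rw [pvSuffix, if_neg hp]
      simp

-- ===== VERDICT (by name: the statement is the Claim_ definition above) =====
theorem CalculateD_spec : Claim_equal_CalculateD := by
  intro W _
  show CalculateD W = CalculateD_alt W
  simp only [CalculateD, CalculateD_alt]
  have hA := pv_mainA W.toList W.toList.length 0 0 (List.replicate W.toList.length 0)
    (by omega) (by simp) (by omega)
  have hB := pv_mainB W.toList W.toList.length 0 0 [] (by omega) (by omega)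
  simp only [Nat.cast_zero] at hA hB
  rw [hA, hB]
  simp
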